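-- pv_equiv track=rewrite | github.com/13924640927/BAC_PRO | pipeline/streak_distribution_run.py | _compute_ge_from_eq
-- ===== SOURCE A (Python) =====
-- from typing import Dict, Tuple, Optional
--
-- def _compute_ge_from_eq(eq: Dict[int, int]) -> Dict[int, int]:
--     """
--     Given exact counts per length: eq[L] = count(len==L),
--     return ge[L] = count(len>=L).
--     """
--     if not eq:
--         return {}
--     max_len = max(eq.keys())
--     running = 0
--     ge = {}
--     for L in range(max_len, 0, -1):
--         running += eq.get(L, 0)
--         if running > 0:
--             ge[L] = running
--     return ge
-- ===== SOURCE B (Python) =====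
-- def _compute_ge_from_eq(eq):
--     """
--     Given exact counts per length: eq[L] = count(len==L),
--     return ge[L] = count(len>=L).
--     Sort-then-segment-fill: the suffix sum only changes at lengths that are
--     actual keys, so walk the distinct keys >= 1 in descending order and fill
--     each constant segment of lengths in one go.
--     """
--     if not eq:
--         return {}
--     ks = sorted((k for k in eq if k >= 1), reverse=True)  # distinct: dict keys
--     ge = {}
--     running = 0
--     n = len(ks)
--     for i, k in enumerate(ks):
--         running += eq[k]
--         lo = ks[i + 1] + 1 if i + 1 < n else 1
--         if running > 0:
--             for L in range(k, lo - 1, -1):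
--                 ge[L] = running
--     return ge
-- ===== Notes on version B (the rewrite author's own statement) =====
-- stated objective: alternative
-- what changed: Replaces A's per-length descending accumulation over range(max_len,0,-1) by sort-then-segment-fill: sort the distinct keys >= 1 in descending order, walk them once, and fill each run of lengths between consecutive keys (where the suffix sum is constant) in one go; Pre_ only excludes association lists with duplicate keys, which do not encode any Python dict.
import Mathlib
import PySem

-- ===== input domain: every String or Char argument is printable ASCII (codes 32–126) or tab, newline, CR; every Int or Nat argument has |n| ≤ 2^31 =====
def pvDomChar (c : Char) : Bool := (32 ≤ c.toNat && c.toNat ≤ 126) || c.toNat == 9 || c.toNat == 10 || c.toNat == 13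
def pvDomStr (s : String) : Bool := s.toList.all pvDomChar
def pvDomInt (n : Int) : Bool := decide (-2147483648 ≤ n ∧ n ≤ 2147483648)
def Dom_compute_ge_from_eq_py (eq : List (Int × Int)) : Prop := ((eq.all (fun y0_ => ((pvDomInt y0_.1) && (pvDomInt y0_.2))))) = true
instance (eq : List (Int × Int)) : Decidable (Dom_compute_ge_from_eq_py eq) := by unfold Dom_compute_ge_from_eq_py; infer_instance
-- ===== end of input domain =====

-- B replaces A's per-length descending accumulation by sort-then-segment-fill over the
-- distinct keys ≥ 1 (same output; a different algorithm of similar cost).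

-- ===== PORT A =====
-- Port of A: max over keys, then running sums from max_len down to 1; 'ge[L] = running'
-- appends, since every L of the descending range is a fresh key of the dict being built.
def compute_ge_from_eq_py (eq : List (Int × Int)) : List (Int × Int) :=
  if eq = [] then []
  else
    let d : PySem.Dict Int Int := PySem.Dict.mk eq
    match PySem.List.max? d.keys (fun x => x) with
    | none => []  -- unreachable: eq ≠ [] so keys ≠ []
    | some max_len =>
      let st := (PySem.List.pyRange max_len 0 (-1)).foldl
        (fun (st : Int × List (Int × Int)) L =>
          let running := st.1 + d.getD L 0
          (running, if running > 0 then st.2 ++ [(L, running)] else st.2))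
        ((0 : Int), ([] : List (Int × Int)))
      st.2

-- ===== PORT B =====
-- Port of B's enumerate walk as structural recursion on the remaining sorted key list ks
-- (the lookahead ks[i+1] is the head of the remaining tail);
-- 'eq[k]' is ported as 'd.getD k 0' (exact: k is always a key of d, the default is unreachable);
-- the inner 'for L in range(k, lo-1, -1): ge[L] = running' appends fresh keys, a foldl append.
def pvFillB (d : PySem.Dict Int Int) : List Int → Int → List (Int × Int) → List (Int × Int)
  | [], _, ge => ge
  | k :: ks, running, ge =>
    let r := running + d.getD k 0
    let lo : Int := match ks with | k2 :: _ => k2 + 1 | [] => 1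
    pvFillB d ks r
      (if r > 0 then (PySem.List.pyRange k (lo - 1) (-1)).foldl (fun acc L => acc ++ [(L, r)]) ge
       else ge)

-- Port of B: sorted distinct keys ≥ 1 descending ('for k in eq' iterates the dict's keys,
-- which are distinct), then the segment-filling walk.
def compute_ge_from_eq_py_alt (eq : List (Int × Int)) : List (Int × Int) :=
  if eq = [] then []
  else
    let d : PySem.Dict Int Int := PySem.Dict.mk eq
    let ks := PySem.List.sorted (d.keys.filter (fun k => decide (1 ≤ k))) (fun x => x) true
    pvFillB d ks 0 []

-- ===== PRECONDITION & SPEC =====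
-- Pre_ excludes association lists with duplicate keys: they do not encode any Python dict
-- (the Python argument is a dict, whose keys are necessarily distinct), so no Python
-- behaviour of A exists there.
def Pre_compute_ge_from_eq_py (eq : List (Int × Int)) : Prop := (eq.map Prod.fst).Nodup
instance (eq : List (Int × Int)) : Decidable (Pre_compute_ge_from_eq_py eq) := by unfold Pre_compute_ge_from_eq_py; infer_instance
def pvWitness_compute_ge_from_eq_py : (List (Int × Int)) := [(1, 2), (3, 1)]
def Spec_compute_ge_from_eq_py (eq : List (Int × Int)) (out : List (Int × Int)) : Prop := out = compute_ge_from_eq_py_alt eq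
instance (eq : List (Int × Int)) (out : List (Int × Int)) : Decidable (Spec_compute_ge_from_eq_py eq out) := by unfold Spec_compute_ge_from_eq_py; infer_instance

-- ===== CLAIM (what is proved, stated in full; the proofs are below) =====
def Claim_equal_compute_ge_from_eq_py : Prop := ∀ (eq : List (Int × Int)), Dom_compute_ge_from_eq_py eq → Pre_compute_ge_from_eq_py eq → Spec_compute_ge_from_eq_py eq (compute_ge_from_eq_py eq)

-- ===== LEMMAS AND PROOFS =====

-- the list of pairs emitted by A's descending loop, started with accumulator r
def emitA (g : Int → Int) : List Int → Int → List (Int × Int)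
  | [], _ => []
  | L :: t, r => (if r + g L > 0 then [(L, r + g L)] else []) ++ emitA g t (r + g L)

-- the list of pairs emitted by B's key walk, started with accumulator r
def emitC (g : Int → Int) : List Int → Int → List (Int × Int)
  | [], _ => []
  | k :: ks, r0 =>
    (if r0 + g k > 0 then (PySem.List.pyRange k (ks.headD 0) (-1)).map (fun L => (L, r0 + g k)) else [])
      ++ emitC g ks (r0 + g k)

theorem foldA_eq (g : Int → Int) (l : List Int) : ∀ (r : Int) (acc : List (Int × Int)),
    l.foldl (fun (st : Int × List (Int × Int)) L =>
        (st.1 + g L, if st.1 + g L > 0 then st.2 ++ [(L, st.1 + g L)] else st.2)) (r, acc)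
      = (r + (l.map g).sum, acc ++ emitA g l r) := by
  induction l with
  | nil => intro r acc; simp [emitA]
  | cons L t ih =>
    intro r acc
    simp only [List.foldl_cons, List.map_cons, List.sum_cons, emitA, ih, Prod.mk.injEq]
    refine ⟨by ring, ?_⟩
    split_ifs with h <;> simp

theorem foldAppend_eq (l : List Int) (r : Int) : ∀ (ge : List (Int × Int)),
    l.foldl (fun acc L => acc ++ [(L, r)]) ge = ge ++ l.map (fun L => (L, r)) := by
  induction l with
  | nil => intro ge; simp
  | cons L t ih => intro ge; simp [ih]

theorem pvFillB_cons (d : PySem.Dict Int Int) (k : Int) (ks : List Int) (r : Int) (ge : List (Int × Int)) :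
    pvFillB d (k :: ks) r ge =
      pvFillB d ks (r + d.getD k 0)
        (if r + d.getD k 0 > 0 then
          (PySem.List.pyRange k ((match ks with | k2 :: _ => k2 + 1 | [] => (1 : Int)) - 1) (-1)).foldl
            (fun acc L => acc ++ [(L, r + d.getD k 0)]) ge
         else ge) := rfl

theorem emitC_cons (g : Int → Int) (k : Int) (ks : List Int) (r0 : Int) :
    emitC g (k :: ks) r0 =
      (if r0 + g k > 0 then (PySem.List.pyRange k (ks.headD 0) (-1)).map (fun L => (L, r0 + g k)) else [])
        ++ emitC g ks (r0 + g k) := rfl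

theorem pvLoSubOne (t : List Int) :
    (match t with | k2 :: _ => k2 + 1 | [] => (1 : Int)) - 1 = t.headD 0 := by
  cases t
  · norm_num
  · simp only [List.headD_cons]; norm_num

theorem pvFillB_eq (d : PySem.Dict Int Int) (ks : List Int) : ∀ (r : Int) (ge : List (Int × Int)),
    pvFillB d ks r ge = ge ++ emitC (fun L => d.getD L 0) ks r := by
  induction ks with
  | nil => intro r ge; simp [pvFillB, emitC]
  | cons k t ih =>
    intro r ge
    rw [pvFillB_cons, ih, emitC_cons, pvLoSubOne t]
    split_ifs with h
    · rw [foldAppend_eq, List.append_assoc]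
    · simp

theorem emitA_append (g : Int → Int) (u v : List Int) : ∀ (r : Int),
    emitA g (u ++ v) r = emitA g u r ++ emitA g v (r + (u.map g).sum) := by
  induction u with
  | nil => intro r; simp [emitA]
  | cons L t ih =>
    intro r
    simp only [List.cons_append, emitA, List.map_cons, List.sum_cons, ih]
    have h1 : r + g L + (t.map g).sum = r + (g L + (t.map g).sum) := by ring
    rw [h1, List.append_assoc]

theorem emitA_const (g : Int → Int) (t : List Int) (h : ∀ L ∈ t, g L = 0) : ∀ (r : Int),
    emitA g t r = if r > 0 then t.map (fun L => (L, r)) else [] := by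
  induction t with
  | nil => intro r; simp [emitA]
  | cons L t ih =>
    intro r
    have hL : g L = 0 := h L (by simp)
    have ht : ∀ L ∈ t, g L = 0 := fun x hx => h x (by simp [hx])
    simp only [emitA, hL, add_zero, ih ht, List.map_cons]
    split_ifs with hr <;> simp

theorem pyRange_neg_one_append (a b c : Int) (h1 : c ≤ b) (h2 : b ≤ a) :
    PySem.List.pyRange a c (-1) = PySem.List.pyRange a b (-1) ++ PySem.List.pyRange b c (-1) := by
  rw [PySem.List.pyRange_neg_one_eq_reverse, PySem.List.pyRange_neg_one_eq_reverse,
      PySem.List.pyRange_neg_one_eq_reverse,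
      PySem.List.pyRange_one_append (c + 1) (b + 1) (a + 1) (by omega) (by omega),
      List.reverse_append]

theorem le_headD_of_pairwise (t : List Int) (hpw : t.Pairwise (fun a b => b < a)) :
    ∀ y ∈ t, y ≤ t.headD 0 := by
  cases t with
  | nil => simp
  | cons k2 t2 =>
    intro y hy
    rcases List.mem_cons.mp hy with rfl | hy2
    · simp
    · have := (List.pairwise_cons.mp hpw).1 y hy2
      simp only [List.headD_cons]; omega

-- A's descending scan from the head key equals B's segment walk, for a strictly
-- decreasing key list ks with all keys ≥ 1 and g zero off ks below the head.
theorem emitA_eq_emitC (g : Int → Int) : ∀ (ks : List Int),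
    ks.Pairwise (fun a b => b < a) → (∀ k ∈ ks, 1 ≤ k) →
    (∀ L, 1 ≤ L → L ≤ ks.headD 0 → L ∉ ks → g L = 0) →
    ∀ r, emitA g (PySem.List.pyRange (ks.headD 0) 0 (-1)) r = emitC g ks r := by
  intro ks
  induction ks with
  | nil =>
    intro _ _ _ r
    rw [PySem.List.pyRange_neg_one_eq_nil (by norm_num)]
    simp [emitA, emitC]
  | cons k t ih =>
    intro hpw hmem hz r
    have hk1 : 1 ≤ k := hmem k (by simp)
    have hpwt : t.Pairwise (fun a b => b < a) := (List.pairwise_cons.mp hpw).2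
    have hbk : t.headD 0 < k := by
      cases t with
      | nil => simpa using hk1
      | cons k2 t2 =>
        have := (List.pairwise_cons.mp hpw).1 k2 (by simp)
        simpa using this
    have hb0 : 0 ≤ t.headD 0 := by
      cases t with
      | nil => simp
      | cons k2 t2 => have := hmem k2 (by simp); simpa using by omega
    have htail0 : ∀ L ∈ PySem.List.pyRange (k - 1) (t.headD 0) (-1), g L = 0 := by
      intro L hL
      rw [PySem.List.mem_pyRange_neg_one] at hL
      refine hz L (by omega) (by simp; omega) ?_
      intro hLmem
      rcases List.mem_cons.mp hLmem with rfl | hLt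
      · omega
      · have := le_headD_of_pairwise t hpwt L hLt; omega
    have hseg : PySem.List.pyRange k (t.headD 0) (-1)
        = k :: PySem.List.pyRange (k - 1) (t.headD 0) (-1) :=
      PySem.List.pyRange_neg_one_cons hbk
    have hsum : ((PySem.List.pyRange k (t.headD 0) (-1)).map g).sum = g k := by
      rw [hseg, List.map_cons, List.sum_cons, List.sum_eq_zero]
      · ring
      · intro x hx
        rcases List.mem_map.mp hx with ⟨L, hL, rfl⟩
        exact htail0 L hL
    have hsplit : PySem.List.pyRange ((k :: t).headD 0) 0 (-1)
        = PySem.List.pyRange k (t.headD 0) (-1) ++ PySem.List.pyRange (t.headD 0) 0 (-1) := by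
      simp only [List.headD_cons]
      exact pyRange_neg_one_append k (t.headD 0) 0 hb0 (by omega)
    rw [hsplit, emitA_append, hsum]
    have hzt : ∀ L, 1 ≤ L → L ≤ t.headD 0 → L ∉ t → g L = 0 := by
      intro L h1 h2 h3
      refine hz L h1 (by simp; omega) ?_
      intro hLmem
      rcases List.mem_cons.mp hLmem with rfl | hLt
      · omega
      · exact h3 hLt
    rw [ih hpwt (fun x hx => hmem x (by simp [hx])) hzt (r + g k)]
    simp only [emitC]
    congr 1
    rw [hseg]
    simp only [emitA, emitA_const g _ htail0 (r + g k), List.map_cons]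
    split_ifs with h <;> simp

-- ===== VERDICT (by name: the statement is the Claim_ definition above) =====
theorem compute_ge_from_eq_py_spec : Claim_equal_compute_ge_from_eq_py := by
  intro eq _ hpre
  unfold Spec_compute_ge_from_eq_py compute_ge_from_eq_py compute_ge_from_eq_py_alt
  by_cases hnil : eq = []
  · simp [hnil]
  · simp only [if_neg hnil]
    have hkeys : (PySem.Dict.mk eq).keys = eq.map Prod.fst := by
      simp [PySem.Dict.keys_mk]
    cases hmax : PySem.List.max? (PySem.Dict.mk eq).keys (fun x => x) with
    | none =>
      exfalso
      rw [PySem.List.max?_eq_none_iff, hkeys, List.map_eq_nil_iff] at hmax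
      exact hnil hmax
    | some m =>
      dsimp only
      rw [foldA_eq (fun L => (PySem.Dict.mk eq).getD L 0), pvFillB_eq]
      dsimp only
      rw [List.nil_append]
      set d := PySem.Dict.mk eq with hd
      set xs := d.keys.filter (fun k => decide (1 ≤ k)) with hxs
      set ks := PySem.List.sorted xs (fun x => x) true with hks
      have hndkeys : d.keys.Nodup := by rw [hd, hkeys]; exact hpre
      have hndks : ks.Nodup :=
        ((PySem.List.sorted_perm xs (fun x => x) true).symm).nodup (hndkeys.filter _)
      have hmemks : ∀ k, k ∈ ks ↔ (k ∈ d.keys ∧ 1 ≤ k) := by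
        intro k
        rw [hks, PySem.List.mem_sorted, hxs, List.mem_filter]
        simp
      by_cases hm1 : 1 ≤ m
      · -- the head of ks is m; apply the segment lemma
        have hmxs : m ∈ xs := by
          rw [hxs, List.mem_filter]
          exact ⟨PySem.List.max?_mem hmax, by simp [hm1]⟩
        have hmks : m ∈ ks := by rw [hks, PySem.List.mem_sorted]; exact hmxs
        have hmax' : ∀ y ∈ d.keys, y ≤ m := PySem.List.max?_isMax hmax
        have hhead : ks.headD 0 = m := by
          cases hkscase : ks with
          | nil => rw [hkscase] at hmks; simp at hmks
          | cons k1 t =>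
            have hsorteq : PySem.List.sorted xs (fun x => x) true = k1 :: t := by
              rw [← hks]; exact hkscase
            have h1 : m ≤ k1 := PySem.List.key_head_sorted_rev_ge xs (fun x => x) hsorteq m hmxs
            have hk1 : k1 ∈ ks := by rw [hkscase]; simp
            have h2 : k1 ≤ m := hmax' k1 ((hmemks k1).mp hk1).1
            simp only [List.headD_cons]; omega
        have hpwks : ks.Pairwise (fun a b => b < a) := by
          have h1 : ks.Pairwise (fun a b => b ≤ a) :=
            PySem.List.sorted_pairwise_rev xs (fun x => x)
          have h2 : ks.Pairwise (fun a b => a ≠ b) := hndks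
          exact (h1.and h2).imp (fun h => by omega)
        have hz' : ∀ L, 1 ≤ L → L ≤ ks.headD 0 → L ∉ ks → d.getD L 0 = 0 := by
          intro L h1 _ h3
          have hnotkey : L ∉ d.keys := fun hmem => h3 ((hmemks L).mpr ⟨hmem, h1⟩)
          have hcf : d.contains L = false := by
            rcases Bool.eq_false_or_eq_true (d.contains L) with h | h
            · exact absurd ((PySem.Dict.contains_iff_mem_keys d L).mp h) hnotkey
            · exact h
          exact PySem.Dict.getD_of_not_contains d 0 hcf
        rw [← hhead]
        exact emitA_eq_emitC (fun L => d.getD L 0) ks hpwks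
          (fun k hk => ((hmemks k).mp hk).2) hz' 0
      · -- m ≤ 0: the range is empty and no key passes the ≥ 1 filter
        have hrange : PySem.List.pyRange m 0 (-1) = [] :=
          PySem.List.pyRange_neg_one_eq_nil (by omega)
        have hxsnil : xs = [] := by
          rw [hxs, List.filter_eq_nil_iff]
          intro k hk
          have := PySem.List.max?_isMax hmax k hk
          simp only [decide_eq_true_eq]
          omega
        have hksnil : ks = [] := by
          rw [hks, hxsnil]
          exact (PySem.List.sorted_eq_nil_iff [] (fun x => x) true).mpr rfl
        rw [hrange, hksnil]
        simp [emitA, emitC]
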